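-- pv_equiv track=rewrite | github.com/domwxyz/marxist-search | backend/src/search/search_engine.py | _filter_by_title_phrases
-- ===== SOURCE A (Python) =====
-- from typing import List, Dict, Optional, Any
--
-- def _filter_by_title_phrases(
--
--     results: List[Dict],
--     title_phrases: List[str]
-- ) -> List[Dict]:
--     """
--     Filter results to only those with titles containing ALL specified phrases.
--
--     Security: Done in Python, no SQL injection possible.
--
--     Args:
--         results: Results to filter
--         title_phrases: List of phrases that must appear in title
--
--     Returns:
--         Filtered results
--     """
--     if not title_phrases:
--         return results
--
--     # Filter by checking title field (already in results)
--     filtered = []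
--     for result in results:
--         title = result.get('title', '').lower()
--
--         # Check if ALL title phrases are present
--         all_present = all(
--             phrase.lower() in title
--             for phrase in title_phrases
--         )
--
--         if all_present:
--             filtered.append(result)
--
--     return filtered
-- ===== SOURCE B (Python) =====
-- def _filter_by_title_phrases(results, title_phrases):
--     # Successively narrow the candidate list, one scan per phrase.
--     filtered = results
--     for phrase in title_phrases:
--         p = phrase.lower()
--         filtered = [r for r in filtered if p in r.get('title', '').lower()]
--     return filtered
-- ===== Notes on version B (the rewrite author's own statement) =====
-- stated objective: alternative
-- what changed: B inverts the loop nesting: instead of one pass over results testing each against all phrases, it iterates over the phrases, narrowing a shrinking candidate list with one filter per phrase (each phrase lowercased once).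
import Mathlib
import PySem

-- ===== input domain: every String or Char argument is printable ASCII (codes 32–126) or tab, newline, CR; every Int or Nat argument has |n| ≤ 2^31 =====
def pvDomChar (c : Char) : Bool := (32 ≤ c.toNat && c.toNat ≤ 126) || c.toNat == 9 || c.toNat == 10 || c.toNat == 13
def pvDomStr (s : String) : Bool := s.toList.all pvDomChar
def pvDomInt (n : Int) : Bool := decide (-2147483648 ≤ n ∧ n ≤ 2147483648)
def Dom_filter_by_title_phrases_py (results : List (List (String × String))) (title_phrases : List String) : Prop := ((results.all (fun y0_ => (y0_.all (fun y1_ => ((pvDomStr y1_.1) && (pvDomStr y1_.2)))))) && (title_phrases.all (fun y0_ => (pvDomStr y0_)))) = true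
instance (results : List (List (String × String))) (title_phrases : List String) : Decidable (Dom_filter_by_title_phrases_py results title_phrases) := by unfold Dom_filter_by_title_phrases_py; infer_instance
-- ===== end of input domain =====

-- B inverts the loop nesting: one filtering pass over a shrinking candidate list per phrase,
-- instead of A's single pass testing each result against all phrases ("alternative" decomposition).

-- ===== PORT A =====
-- result.get('title', '')  (dict as insertion-ordered association list)
def pvTitle (r : List (String × String)) : String := (PySem.Dict.mk r).getD "title" ""

def filter_by_title_phrases_py (results : List (List (String × String))) (title_phrases : List String) : List (List (String × String)) :=
  if title_phrases = [] then results
  else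
    results.foldl (fun filtered result =>
      let title := PySem.Str.lower (pvTitle result)
      let all_present := title_phrases.all (fun phrase => PySem.Str.isIn (PySem.Str.lower phrase) title)
      if all_present then filtered ++ [result] else filtered) []

-- ===== PORT B =====
def filter_by_title_phrases_py_alt (results : List (List (String × String))) (title_phrases : List String) : List (List (String × String)) :=
  title_phrases.foldl (fun filtered phrase =>
    let p := PySem.Str.lower phrase
    filtered.filter (fun r => PySem.Str.isIn p (PySem.Str.lower (pvTitle r)))) results

-- ===== PRECONDITION & SPEC =====
def Spec_filter_by_title_phrases_py (results : List (List (String × String))) (title_phrases : List String) (out : List (List (String × String))) : Prop := out = filter_by_title_phrases_py_alt results title_phrases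
instance (results : List (List (String × String))) (title_phrases : List String) (out : List (List (String × String))) : Decidable (Spec_filter_by_title_phrases_py results title_phrases out) := by unfold Spec_filter_by_title_phrases_py; infer_instance

-- ===== CLAIM (what is proved, stated in full; the proofs are below) =====
def Claim_equal_filter_by_title_phrases_py : Prop := ∀ (results : List (List (String × String))) (title_phrases : List String), Dom_filter_by_title_phrases_py results title_phrases → Spec_filter_by_title_phrases_py results title_phrases (filter_by_title_phrases_py results title_phrases)

-- ===== LEMMAS AND PROOFS =====


-- the per-result test for one phrase
def pvTest (phrase : String) (r : List (String × String)) : Bool :=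
  PySem.Str.isIn (PySem.Str.lower phrase) (PySem.Str.lower (pvTitle r))

theorem alt_eq_filter (title_phrases : List String) (results : List (List (String × String))) :
    filter_by_title_phrases_py_alt results title_phrases
      = results.filter (fun r => title_phrases.all (fun p => pvTest p r)) := by
  induction title_phrases generalizing results with
  | nil => simp [filter_by_title_phrases_py_alt]
  | cons p ps ih =>
      simp only [filter_by_title_phrases_py_alt, List.foldl_cons] at *
      rw [ih, List.filter_filter]
      apply List.filter_congr
      intro r _
      simp [pvTest, List.all_cons, Bool.and_comm]

theorem a_eq_filter (results : List (List (String × String))) (title_phrases : List String)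
    (acc : List (List (String × String))) :
    results.foldl (fun filtered result =>
      if title_phrases.all (fun p => pvTest p result) then filtered ++ [result] else filtered) acc
      = acc ++ results.filter (fun r => title_phrases.all (fun p => pvTest p r)) := by
  induction results generalizing acc with
  | nil => simp
  | cons r rs ih =>
      simp only [List.foldl_cons, List.filter_cons]
      cases hc : title_phrases.all (fun p => pvTest p r) with
      | true => rw [if_pos rfl, ih]; simp
      | false => rw [if_neg (by simp), ih]; simp

-- ===== VERDICT (by name: the statement is the Claim_ definition above) =====
theorem filter_by_title_phrases_py_spec : Claim_equal_filter_by_title_phrases_py := by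
  intro results title_phrases _
  unfold Spec_filter_by_title_phrases_py
  rw [alt_eq_filter]
  unfold filter_by_title_phrases_py
  by_cases h : title_phrases = []
  · subst h; simp [pvTest]
  · rw [if_neg h]
    exact (a_eq_filter results title_phrases []).trans (by simp)
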